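-- pv_equiv track=rewrite | github.com/denizeyup/Chaos-Based-Image-Encryption | Arnolds-Cat-Map/arnolds_cat_map.py | arnold_cat_map
-- ===== SOURCE A (Python) =====
-- def arnold_cat_map(image_matrix, iterations):
--     width, height = len(image_matrix), len(image_matrix[0])
--     encrypted_image = [[0] * height for _ in range(width)]
--
--     for x in range(width):
--         for y in range(height):
--             new_x = (2 * x + y) % width
--             new_y = (x + y) % height
--             encrypted_image[new_x][new_y] = image_matrix[x][y]
--
--     if iterations > 1:
--         return arnold_cat_map(encrypted_image, iterations - 1)
--     else:
--         return encrypted_image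
-- ===== SOURCE B (Python) =====
-- def arnold_cat_map(image_matrix, iterations):
--     width, height = len(image_matrix), len(image_matrix[0])
--     k = iterations if iterations > 1 else 1
--
--     # dest -> source map of ONE step (last writer wins, like A's scatter loop)
--     step = {}
--     for x in range(width):
--         for y in range(height):
--             step[((2 * x + y) % width, (x + y) % height)] = (x, y)
--
--     # compose partial dest->source maps: first, then 'then'
--     def compose(first, then):
--         return {c: then[s] for c, s in first.items() if s in then}
--
--     # binary lifting: total becomes the dest->source map of k steps
--     total = {(i, j): (i, j) for i in range(width) for j in range(height)}
--     base = step
--     while k > 0: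
--         if k % 2 == 1:
--             total = compose(total, base)
--         base = compose(base, base)
--         k //= 2
--
--     # single gather pass
--     result = [[0] * height for _ in range(width)]
--     for (i, j), (x, y) in total.items():
--         result[i][j] = image_matrix[x][y]
--     return result
-- ===== Notes on version B (the rewrite author's own statement) =====
-- stated objective: faster
-- what changed: Instead of rebuilding the whole matrix once per iteration (A's recursion), B builds the one-step dest->source index map once as a dict, raises it to the k-th power by binary lifting (squaring compositions), and fills the output with a single gather pass.
-- outside the precondition, e.g. on arnold_cat_map([], 0): A raises IndexError, B raises IndexError; on arnold_cat_map([[1, 2], [3]], 1): A raises IndexError, B raises IndexError; on arnold_cat_map([[5]], 950): A returns [[5]], B returns [[5]]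
import Mathlib
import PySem

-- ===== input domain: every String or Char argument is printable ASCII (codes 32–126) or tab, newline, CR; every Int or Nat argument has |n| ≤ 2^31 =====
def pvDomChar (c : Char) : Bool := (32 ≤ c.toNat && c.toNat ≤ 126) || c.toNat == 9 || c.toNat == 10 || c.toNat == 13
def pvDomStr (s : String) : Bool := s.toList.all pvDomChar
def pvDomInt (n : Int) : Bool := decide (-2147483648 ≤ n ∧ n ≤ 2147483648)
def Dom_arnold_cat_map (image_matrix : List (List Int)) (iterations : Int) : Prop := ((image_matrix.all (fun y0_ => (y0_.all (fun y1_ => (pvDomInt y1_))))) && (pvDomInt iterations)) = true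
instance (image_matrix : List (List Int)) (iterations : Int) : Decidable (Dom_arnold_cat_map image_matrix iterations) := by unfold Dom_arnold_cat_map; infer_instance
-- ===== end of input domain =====

-- B replaces A's per-iteration matrix rebuild by composing the one-step dest→source
-- index map with itself via binary lifting and a single final gather pass (objective: faster).

-- ===== PORT A =====
def arnold_cat_map (image_matrix : List (List Int)) (iterations : Int) : List (List Int) :=
  let width : Int := PySem.List.len image_matrix
  let height : Int := PySem.List.len ((PySem.List.pyGet? image_matrix 0).getD [])
  let encrypted_image : List (List Int) :=
    List.replicate width.toNat (List.replicate height.toNat (0 : Int))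
  let encrypted_image :=
    (PySem.List.pyRange 0 width).foldl (fun enc x =>
      (PySem.List.pyRange 0 height).foldl (fun enc y =>
        let new_x := PySem.Int.mod (2 * x + y) width
        let new_y := PySem.Int.mod (x + y) height
        PySem.List.pySetD enc new_x
          (PySem.List.pySetD ((PySem.List.pyGet? enc new_x).getD []) new_y
            ((PySem.List.pyGet? ((PySem.List.pyGet? image_matrix x).getD []) y).getD 0))) enc)
      encrypted_image
  if iterations > 1 then arnold_cat_map encrypted_image (iterations - 1) else encrypted_image
termination_by iterations.toNat
decreasing_by omega

-- ===== PORT B =====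
-- compose partial dest->source maps: first, then `then_`
def acmCompose (first then_ : PySem.Dict (Int × Int) (Int × Int)) : PySem.Dict (Int × Int) (Int × Int) :=
  first.items.foldl (fun acc p =>
    match then_.get? p.2 with
    | some s => acc.insert p.1 s
    | none => acc) PySem.Dict.empty

-- the binary-lifting `while k > 0` loop of Source B
def acmLift (total base : PySem.Dict (Int × Int) (Int × Int)) (k : Int) : PySem.Dict (Int × Int) (Int × Int) :=
  if k > 0 then
    acmLift (if PySem.Int.mod k 2 = 1 then acmCompose total base else total)
      (acmCompose base base) (PySem.Int.floordiv k 2)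
  else total
termination_by k.toNat
decreasing_by
  have h2 : PySem.Int.floordiv k 2 = k / 2 := PySem.Int.floordiv_eq_ediv_of_pos (by omega)
  rw [h2]; omega

def arnold_cat_map_alt (image_matrix : List (List Int)) (iterations : Int) : List (List Int) :=
  let width : Int := PySem.List.len image_matrix
  let height : Int := PySem.List.len ((PySem.List.pyGet? image_matrix 0).getD [])
  let k : Int := if iterations > 1 then iterations else 1
  let step :=
    (PySem.List.pyRange 0 width).foldl (fun d x =>
      (PySem.List.pyRange 0 height).foldl (fun d y =>
        d.insert (PySem.Int.mod (2 * x + y) width, PySem.Int.mod (x + y) height) (x, y)) d)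
      PySem.Dict.empty
  let total :=
    (PySem.List.pyRange 0 width).foldl (fun d i =>
      (PySem.List.pyRange 0 height).foldl (fun d j => d.insert (i, j) (i, j)) d)
      PySem.Dict.empty
  let tot := acmLift total step k
  let result : List (List Int) :=
    List.replicate width.toNat (List.replicate height.toNat (0 : Int))
  tot.items.foldl (fun res p =>
    PySem.List.pySetD res p.1.1
      (PySem.List.pySetD ((PySem.List.pyGet? res p.1.1).getD []) p.1.2
        ((PySem.List.pyGet? ((PySem.List.pyGet? image_matrix p.2.1).getD []) p.2.2).getD 0)))
    result

-- ===== PRECONDITION & SPEC =====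
-- Pre_ excludes inputs on which Python A raises: the empty matrix (IndexError on image_matrix[0]),
-- matrices with a row shorter than row 0 (IndexError on image_matrix[x][y]), and iteration counts
-- above 900, where A's recursion depth reaches CPython's recursion limit and raises RecursionError
-- (the bound is conservative, so A still returns on some excluded iteration counts near the limit).
def Pre_arnold_cat_map (image_matrix : List (List Int)) (iterations : Int) : Prop :=
  image_matrix ≠ [] ∧
  (∀ row ∈ image_matrix, (image_matrix.headD []).length ≤ row.length) ∧
  iterations ≤ 900
instance (image_matrix : List (List Int)) (iterations : Int) : Decidable (Pre_arnold_cat_map image_matrix iterations) := by unfold Pre_arnold_cat_map; infer_instance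

def pvWitness_arnold_cat_map : List (List Int) × Int := ([[1, 2], [3, 4]], 3)

def Spec_arnold_cat_map (image_matrix : List (List Int)) (iterations : Int) (out : List (List Int)) : Prop := out = arnold_cat_map_alt image_matrix iterations
instance (image_matrix : List (List Int)) (iterations : Int) (out : List (List Int)) : Decidable (Spec_arnold_cat_map image_matrix iterations out) := by unfold Spec_arnold_cat_map; infer_instance

-- ===== CLAIM (what is proved, stated in full; the proofs are below) =====
def Claim_equal_arnold_cat_map : Prop := ∀ (image_matrix : List (List Int)) (iterations : Int), Dom_arnold_cat_map image_matrix iterations → Pre_arnold_cat_map image_matrix iterations → Spec_arnold_cat_map image_matrix iterations (arnold_cat_map image_matrix iterations)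

-- ===== LEMMAS AND PROOFS =====

def acmP (w h : Nat) : List (Int × Int) :=
  (List.range w).flatMap (fun (i : Nat) => (List.range h).map (fun (j : Nat) => ((i : Int), (j : Int))))
def acmIn (w h : Nat) (c : Int × Int) : Prop :=
  0 ≤ c.1 ∧ c.1 < (w : Int) ∧ 0 ≤ c.2 ∧ c.2 < (h : Int)

lemma acm_nested_fold_eq {β : Type} (w h : Nat) (f : β → Int × Int → β) (init : β) :
    (PySem.List.pyRange 0 (w : Int)).foldl (fun acc x =>
      (PySem.List.pyRange 0 (h : Int)).foldl (fun acc y => f acc (x, y)) acc) init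
    = (acmP w h).foldl f init := by
  simp only [acmP, PySem.List.pyRange_zero_natCast, List.foldl_map, List.foldl_flatMap]

lemma acm_mem_acmP {w h : Nat} {c : Int × Int} : c ∈ acmP w h ↔ acmIn w h c := by
  obtain ⟨a, b⟩ := c
  simp only [acmP, acmIn, List.mem_flatMap, List.mem_map, List.mem_range, Prod.mk.injEq]
  constructor
  · rintro ⟨i, hi, j, hj, rfl, rfl⟩; refine ⟨by omega, by omega, by omega, by omega⟩
  · rintro ⟨h1, h2, h3, h4⟩
    exact ⟨a.toNat, by omega, b.toNat, ⟨by omega, by omega, by omega⟩⟩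

lemma acm_get?_scatterD {κ ν : Type} [BEq κ] [LawfulBEq κ] (ws : List (κ × ν)) (d : PySem.Dict κ ν) (c : κ) :
    (ws.foldl (fun d p => d.insert p.1 p.2) d).get? c
      = match ws.reverse.find? (fun p => p.1 == c) with
        | some p => some p.2
        | none => d.get? c := by
  induction ws generalizing d with
  | nil => simp
  | cons p t ih =>
    simp only [List.foldl_cons, List.reverse_cons, List.find?_append, ih]
    cases hf : t.reverse.find? (fun p => p.1 == c) with
    | some q => simp [Option.or]
    | none =>
      simp only [Option.none_or]
      by_cases hpc : p.1 = c
      · subst hpc; simp [PySem.Dict.get?_insert_self]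
      · simp [hpc, PySem.Dict.get?_insert_of_ne _ _ (Ne.symm hpc)]

lemma acm_get?_eq_find? {κ ν : Type} [BEq κ] (d : PySem.Dict κ ν) (c : κ) :
    d.get? c = (d.items.find? (fun p => p.1 == c)).map (·.2) := rfl

lemma acm_revfind_eq_find {κ ν : Type} [BEq κ] [LawfulBEq κ] (l : List (κ × ν)) (c : κ)
    (hnd : (l.map (·.1)).Nodup) :
    l.reverse.find? (fun p => p.1 == c) = l.find? (fun p => p.1 == c) := by
  induction l with
  | nil => simp
  | cons p t ih =>
    simp only [List.map_cons, List.nodup_cons] at hnd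
    simp only [List.reverse_cons, List.find?_append, List.find?_cons, ih hnd.2]
    by_cases hpc : p.1 = c
    · have ht : t.find? (fun p => p.1 == c) = none := by
        rw [List.find?_eq_none]
        intro q hq hbeq
        exact hnd.1 (List.mem_map.mpr ⟨q, hq, (show q.1 = p.1 from by simp_all)⟩)
      simp [ht, hpc]
    · have hb : (p.1 == c) = false := by simpa using hpc
      simp [hb]

def acmE (M : List (List Int)) (c : Int × Int) : Int :=
  (PySem.List.pyGet? ((PySem.List.pyGet? M c.1).getD []) c.2).getD 0
def acmW (res : List (List Int)) (q : (Int × Int) × Int) : List (List Int) :=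
  PySem.List.pySetD res q.1.1
    (PySem.List.pySetD ((PySem.List.pyGet? res q.1.1).getD []) q.1.2 q.2)
def acmShape (w h : Nat) (M : List (List Int)) : Prop :=
  M.length = w ∧ ∀ r ∈ M, r.length = h

lemma acmE_nonneg (M : List (List Int)) (c : Int × Int) (h1 : 0 ≤ c.1) (h2 : 0 ≤ c.2) :
    acmE M c = ((M[c.1.toNat]?.getD [])[c.2.toNat]?).getD 0 := by
  simp [acmE, PySem.List.pyGet?_of_nonneg _ h1, PySem.List.pyGet?_of_nonneg _ h2]

lemma acmW_eq (M : List (List Int)) (q : (Int × Int) × Int) (h1 : 0 ≤ q.1.1) (h2 : 0 ≤ q.1.2) :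
    acmW M q = M.set q.1.1.toNat ((M[q.1.1.toNat]?.getD []).set q.1.2.toNat q.2) := by
  simp [acmW, PySem.List.pySetD_of_nonneg _ _ h1, PySem.List.pySetD_of_nonneg _ _ h2,
    PySem.List.pyGet?_of_nonneg _ h1]

lemma acmW_shape {w h : Nat} {M : List (List Int)} (hs : acmShape w h M)
    {q : (Int × Int) × Int} (hq : acmIn w h q.1) : acmShape w h (acmW M q) := by
  obtain ⟨hq1, hq2, hq3, hq4⟩ := hq
  rw [acmW_eq M q hq1 hq3]
  obtain ⟨hl, hr⟩ := hs
  constructor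
  · simp [hl]
  · intro r hrmem
    rcases List.mem_or_eq_of_mem_set hrmem with hmem | rfl
    · exact hr r hmem
    · have hidx : q.1.1.toNat < M.length := by omega
      have : M[q.1.1.toNat]?.getD [] = M[q.1.1.toNat] := by simp [List.getElem?_eq_getElem hidx]
      rw [this, List.length_set]
      exact hr _ (List.getElem_mem _)

lemma acmE_acmW {w h : Nat} {M : List (List Int)} (hs : acmShape w h M)
    {q : (Int × Int) × Int} (hq : acmIn w h q.1) {c : Int × Int} (hc : acmIn w h c) :
    acmE (acmW M q) c = if q.1 = c then q.2 else acmE M c := by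
  obtain ⟨hq1, hq2, hq3, hq4⟩ := hq
  obtain ⟨hc1, hc2, hc3, hc4⟩ := hc
  obtain ⟨hl, hr⟩ := hs
  rw [acmW_eq M q hq1 hq3, acmE_nonneg _ _ hc1 hc3]
  have hqi : q.1.1.toNat < M.length := by omega
  have hci : c.1.toNat < M.length := by omega
  have hrow : M[q.1.1.toNat]?.getD [] = M[q.1.1.toNat] := by simp [List.getElem?_eq_getElem hqi]
  by_cases hx : c.1.toNat = q.1.1.toNat
  · have hget : (M.set q.1.1.toNat (((M[q.1.1.toNat]?).getD []).set q.1.2.toNat q.2))[c.1.toNat]?.getD []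
        = (M[q.1.1.toNat]).set q.1.2.toNat q.2 := by
      rw [hx]; simp [hqi]
    rw [hget]
    have hrlen : (M[q.1.1.toNat]).length = h := hr _ (List.getElem_mem _)
    by_cases hy : c.2.toNat = q.1.2.toNat
    · have e1 : q.1.1 = c.1 := by omega
      have e2 : q.1.2 = c.2 := by omega
      have hqc : q.1 = c := Prod.ext e1 e2
      rw [if_pos hqc, hy, List.getElem?_set_self (by omega)]
      simp
    · have hne : q.1 ≠ c := by intro hcon; apply hy; rw [← hcon]
      rw [List.getElem?_set_ne (by omega)]
      simp [hne, acmE_nonneg _ _ hc1 hc3, hx, hrow]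
  · have hne : q.1 ≠ c := by intro hcon; apply hx; rw [← hcon]
    rw [List.getElem?_set_ne (by omega)]
    simp [hne, acmE_nonneg _ _ hc1 hc3]

lemma acm_scatter {w h : Nat} (ws : List ((Int × Int) × Int)) (hws : ∀ p ∈ ws, acmIn w h p.1) :
    ∀ M, acmShape w h M → acmShape w h (ws.foldl acmW M) ∧
      (∀ c, acmIn w h c → acmE (ws.foldl acmW M) c =
        match ws.reverse.find? (fun p => p.1 == c) with
        | some p => p.2
        | none => acmE M c) := by
  induction ws with
  | nil => intro M hM; exact ⟨hM, fun c _ => by simp⟩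
  | cons p t ih =>
    intro M hM
    have hp := hws p (by simp)
    have ht : ∀ q ∈ t, acmIn w h q.1 := fun q hq => hws q (by simp [hq])
    obtain ⟨ihs, ihe⟩ := ih ht (acmW M p) (acmW_shape hM hp)
    refine ⟨ihs, fun c hc => ?_⟩
    simp only [List.foldl_cons] at *
    rw [ihe c hc, List.reverse_cons, List.find?_append]
    cases hf : t.reverse.find? (fun q => q.1 == c) with
    | some q => simp [Option.or]
    | none =>
      simp only [Option.none_or]
      rw [acmE_acmW hM hp hc]
      by_cases hpc : p.1 = c
      · simp [hpc]
      · have hb : (p.1 == c) = false := by simpa using hpc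
        simp [hb, hpc]

def acmG (w h : Int) (c : Int × Int) : Int × Int :=
  (PySem.Int.mod (2 * c.1 + c.2) w, PySem.Int.mod (c.1 + c.2) h)
def acmBuild (w h : Nat) (f : Int × Int → Int) : List (List Int) :=
  (List.range w).map (fun (i : Nat) => (List.range h).map (fun (j : Nat) => f ((i : Int), (j : Int))))
def acmPM (w h : Nat) (c : Int × Int) : Option (Int × Int) :=
  (acmP w h).reverse.find? (fun s => acmG w h s == c)
def acmPow (p : Int × Int → Option (Int × Int)) : Nat → Int × Int → Option (Int × Int)
  | 0 => fun c => some c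
  | n + 1 => fun c => (p c).bind (acmPow p n)
def acmStep (m : List (List Int)) : List (List Int) :=
  let width : Int := PySem.List.len m
  let height : Int := PySem.List.len ((PySem.List.pyGet? m 0).getD [])
  (PySem.List.pyRange 0 width).foldl (fun enc x =>
    (PySem.List.pyRange 0 height).foldl (fun enc y =>
      let new_x := PySem.Int.mod (2 * x + y) width
      let new_y := PySem.Int.mod (x + y) height
      PySem.List.pySetD enc new_x
        (PySem.List.pySetD ((PySem.List.pyGet? enc new_x).getD []) new_y
          ((PySem.List.pyGet? ((PySem.List.pyGet? m x).getD []) y).getD 0))) enc)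
    (List.replicate width.toNat (List.replicate height.toNat (0 : Int)))
def acmHN (m : List (List Int)) : Nat := ((PySem.List.pyGet? m 0).getD []).length

lemma acmShape_build (w h : Nat) (f : Int × Int → Int) : acmShape w h (acmBuild w h f) := by
  constructor
  · simp [acmBuild]
  · intro r hr
    simp only [acmBuild, List.mem_map] at hr
    obtain ⟨i, _, rfl⟩ := hr
    simp

lemma acmE_build {w h : Nat} {c : Int × Int} (hc : acmIn w h c) (f : Int × Int → Int) :
    acmE (acmBuild w h f) c = f c := by
  obtain ⟨h1, h2, h3, h4⟩ := hc
  rw [acmE_nonneg _ _ h1 h3]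
  have hi : c.1.toNat < w := by omega
  have hj : c.2.toNat < h := by omega
  simp [acmBuild, hi, hj]
  rw [max_eq_left h1, max_eq_left h3]

lemma acm_eq_build {w h : Nat} {M : List (List Int)} (hs : acmShape w h M)
    {f : Int × Int → Int} (he : ∀ c, acmIn w h c → acmE M c = f c) : M = acmBuild w h f := by
  obtain ⟨hl, hr⟩ := hs
  apply List.ext_getElem (by simp [acmBuild, hl])
  intro i hi1 hi2
  simp only [acmBuild, List.getElem_map, List.getElem_range]
  apply List.ext_getElem (by simp [hr _ (List.getElem_mem _)])
  intro j hj1 hj2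
  simp only [List.getElem_map, List.getElem_range]
  have hiw : i < w := by simpa [hl] using hi1
  have hjh : j < h := by have := hr _ (List.getElem_mem hi1); omega
  have hin : acmIn w h ((i : Int), (j : Int)) := ⟨by omega, by omega, by omega, by omega⟩
  have := he _ hin
  rw [acmE_nonneg _ _ (by omega) (by omega)] at this
  simpa [List.getElem?_eq_getElem, hi1, hj1] using this

lemma acm_build_congr {w h : Nat} {f g : Int × Int → Int}
    (hfg : ∀ c, acmIn w h c → f c = g c) : acmBuild w h f = acmBuild w h g := by
  apply acm_eq_build (acmShape_build w h f)
  intro c hc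
  rw [acmE_build hc f]
  exact hfg c hc

lemma acmShape_zeros (w h : Nat) : acmShape w h (List.replicate w (List.replicate h (0 : Int))) := by
  constructor
  · simp
  · intro r hr
    rw [List.eq_of_mem_replicate hr]; simp

lemma acmE_zeros {w h : Nat} {c : Int × Int} (hc : acmIn w h c) :
    acmE (List.replicate w (List.replicate h (0 : Int))) c = 0 := by
  obtain ⟨h1, h2, h3, h4⟩ := hc
  rw [acmE_nonneg _ _ h1 h3]
  have hi : c.1.toNat < w := by omega
  simp [hi]

lemma acmPM_some {w h : Nat} {c s : Int × Int} (hsome : acmPM w h c = some s) :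
    acmIn w h s ∧ acmIn w h c ∧ s ∈ acmP w h := by
  have hmem : s ∈ (acmP w h).reverse := List.mem_of_find?_eq_some hsome
  have hpred := List.find?_some hsome
  have hs : s ∈ acmP w h := List.mem_reverse.mp hmem
  have hin := acm_mem_acmP.mp hs
  have hc : acmG w h s = c := by simpa using hpred
  obtain ⟨e1, e2, e3, e4⟩ := hin
  refine ⟨⟨e1, e2, e3, e4⟩, ?_, hs⟩
  rw [← hc]
  have hw : (0 : Int) < w := by omega
  have hh : (0 : Int) < h := by omega
  exact ⟨PySem.Int.mod_nonneg _ hw, PySem.Int.mod_lt _ hw,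
    PySem.Int.mod_nonneg _ hh, PySem.Int.mod_lt _ hh⟩

lemma acmStep_eq_scatter (m : List (List Int)) :
    acmStep m = ((acmP m.length (acmHN m)).map
        (fun c => (acmG (m.length : Int) ((acmHN m : Nat) : Int) c, acmE m c))).foldl acmW
      (List.replicate m.length (List.replicate (acmHN m) (0 : Int))) := by
  rw [List.foldl_map]
  exact acm_nested_fold_eq m.length (acmHN m)
    (fun enc c => acmW enc (acmG (m.length : Int) ((acmHN m : Nat) : Int) c, acmE m c)) _

lemma acmStep_eq_build {w h : Nat} {m : List (List Int)} (hw : m.length = w) (hh : acmHN m = h) :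
    acmStep m = acmBuild w h (fun c => ((acmPM w h c).map (acmE m)).getD 0) := by
  subst hw hh
  set w := m.length
  set h := acmHN m
  rw [acmStep_eq_scatter]
  set g := fun c => (acmG (w : Int) (h : Int) c, acmE m c) with hg
  have hdest : ∀ p ∈ (acmP w h).map g, acmIn w h p.1 := by
    intro p hp
    simp only [List.mem_map] at hp
    obtain ⟨c, hc, rfl⟩ := hp
    have hin := acm_mem_acmP.mp hc
    obtain ⟨e1, e2, e3, e4⟩ := hin
    have hw : (0 : Int) < w := by omega
    have hhp : (0 : Int) < h := by omega
    exact ⟨PySem.Int.mod_nonneg _ hw, PySem.Int.mod_lt _ hw,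
      PySem.Int.mod_nonneg _ hhp, PySem.Int.mod_lt _ hhp⟩
  obtain ⟨hs, he⟩ := acm_scatter _ hdest _ (acmShape_zeros w h)
  apply acm_eq_build hs
  intro c hc
  rw [he c hc, ← List.map_reverse, List.find?_map]
  rw [show ((fun p => p.1 == c) ∘ g) = (fun s => acmG (w : Int) (h : Int) s == c) from rfl]
  rw [show ((acmP w h).reverse.find? (fun s => acmG (w : Int) (h : Int) s == c)) = acmPM w h c from rfl]
  cases hpm : acmPM w h c with
  | some s => simp [hg]
  | none => simp [acmE_zeros hc]

lemma acmPow_congr {p q : Int × Int → Option (Int × Int)} (hpq : ∀ c, p c = q c) :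
    ∀ n c, acmPow p n c = acmPow q n c := by
  intro n
  induction n with
  | zero => intro c; rfl
  | succ k ih =>
    intro c
    simp only [acmPow, hpq c]
    cases q c with
    | none => rfl
    | some s => simp [ih s]

lemma acmPow_sq (p : Int × Int → Option (Int × Int)) :
    ∀ (n : Nat) (c), acmPow (fun c => (p c).bind p) n c = acmPow p (2 * n) c := by
  intro n
  induction n with
  | zero => intro c; rfl
  | succ k ih =>
    intro c
    have h2 : 2 * (k + 1) = (2 * k + 1) + 1 := by ring
    rw [h2]
    simp only [acmPow, Option.bind_assoc]
    cases hpc : p c with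
    | none => simp
    | some s =>
      simp only [Option.bind]
      cases hps : p s with
      | none => simp
      | some t => simpa using ih t

lemma acmHN_build {w h : Nat} (hw0 : 0 < w) (f : Int × Int → Int) :
    acmHN (acmBuild w h f) = h := by
  obtain ⟨k, rfl⟩ : ∃ k, w = k + 1 := ⟨w - 1, by omega⟩
  simp [acmHN, acmBuild, List.range_succ_eq_map]

lemma acm_iter_build {w h : Nat} (hw0 : 0 < w) (m : List (List Int))
    (hw : m.length = w) (hh : acmHN m = h) :
    ∀ n, acmStep^[n + 1] m = acmBuild w h (fun c => ((acmPow (acmPM w h) (n + 1) c).map (acmE m)).getD 0) := by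
  intro n
  induction n with
  | zero =>
    rw [Function.iterate_one, acmStep_eq_build hw hh]
    apply acm_build_congr
    intro c _
    have : acmPow (acmPM w h) 1 c = acmPM w h c := by
      simp only [acmPow]
      cases acmPM w h c <;> rfl
    rw [this]
  | succ k ih =>
    rw [Function.iterate_succ_apply', ih]
    rw [acmStep_eq_build (w := w) (h := h) (by simp [acmBuild]) (acmHN_build hw0 _)]
    apply acm_build_congr
    intro c _
    cases hpm : acmPM w h c with
    | none =>
      simp [show acmPow (acmPM w h) (k + 1 + 1) c = none by simp [acmPow, hpm]]
    | some s =>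
      have hs := (acmPM_some hpm).1
      simp only [Option.map_some, Option.getD_some]
      rw [acmE_build hs]
      have : acmPow (acmPM w h) (k + 1 + 1) c = acmPow (acmPM w h) (k + 1) s := by
        simp [acmPow, hpm]
      rw [this]

-- A's recursion, unfolded once
lemma acm_A_unfold (m : List (List Int)) (it : Int) :
    arnold_cat_map m it = if it > 1 then arnold_cat_map (acmStep m) (it - 1) else acmStep m := by
  rw [arnold_cat_map]; rfl

lemma acm_A_eq_iter_aux : ∀ (fuel : Nat) (it : Int) (m : List (List Int)), it.toNat ≤ fuel →
    arnold_cat_map m it = acmStep^[max it.toNat 1] m := by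
  intro fuel
  induction fuel with
  | zero =>
    intro it m hle
    rw [acm_A_unfold, if_neg (by omega)]
    have : max it.toNat 1 = 1 := by omega
    rw [this, Function.iterate_one]
  | succ f ih =>
    intro it m hle
    rw [acm_A_unfold]
    by_cases hgt : it > 1
    · rw [if_pos hgt, ih (it - 1) (acmStep m) (by omega)]
      have h1 : max (it - 1).toNat 1 = it.toNat - 1 := by omega
      have h2 : max it.toNat 1 = (it.toNat - 1) + 1 := by omega
      rw [h1, h2, Function.iterate_succ_apply]
    · rw [if_neg hgt]
      have : max it.toNat 1 = 1 := by omega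
      rw [this, Function.iterate_one]

lemma acm_A_eq_iter (m : List (List Int)) (it : Int) :
    arnold_cat_map m it = acmStep^[max it.toNat 1] m :=
  acm_A_eq_iter_aux it.toNat it m le_rfl

-- B-side
lemma acmCompose_eq (f t : PySem.Dict (Int × Int) (Int × Int)) :
    acmCompose f t = (f.items.filterMap (fun p => (t.get? p.2).map (fun s => (p.1, s)))).foldl
      (fun acc q => acc.insert q.1 q.2) PySem.Dict.empty := by
  have aux : ∀ (l : List ((Int × Int) × (Int × Int))) (d : PySem.Dict (Int × Int) (Int × Int)),
      l.foldl (fun acc p =>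
        match t.get? p.2 with
        | some s => acc.insert p.1 s
        | none => acc) d
      = (l.filterMap (fun p => (t.get? p.2).map (fun s => (p.1, s)))).foldl
          (fun acc q => acc.insert q.1 q.2) d := by
    intro l
    induction l with
    | nil => intro d; rfl
    | cons p r ih =>
      intro d
      simp only [List.foldl_cons, List.filterMap_cons]
      cases ht : t.get? p.2 with
      | none => simp [ih]
      | some s => simp [ih]
  exact aux f.items _

lemma acm_keys_filterMap_sublist (t : PySem.Dict (Int × Int) (Int × Int)) (l : List ((Int × Int) × (Int × Int))) :
    ((l.filterMap (fun p => (t.get? p.2).map (fun s => (p.1, s)))).map (·.1)).Sublist (l.map (·.1)) := by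
  induction l with
  | nil => simp
  | cons p r ih =>
    simp only [List.filterMap_cons]
    cases ht : t.get? p.2 with
    | none => simpa using ih.trans (List.sublist_cons_self _ _)
    | some s => simpa using List.Sublist.cons₂ p.1 ih

lemma acm_find?_filterMap (t : PySem.Dict (Int × Int) (Int × Int)) (c : Int × Int) :
    ∀ (l : List ((Int × Int) × (Int × Int))), (l.map (·.1)).Nodup →
      (l.filterMap (fun p => (t.get? p.2).map (fun s => (p.1, s)))).find? (fun q => q.1 == c)
        = (l.find? (fun p => p.1 == c)).bind (fun p => (t.get? p.2).map (fun s => (p.1, s))) := by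
  intro l hnd
  induction l with
  | nil => simp
  | cons p r ih =>
    simp only [List.map_cons, List.nodup_cons] at hnd
    simp only [List.filterMap_cons, List.find?_cons]
    by_cases hpc : p.1 = c
    · have hb : (p.1 == c) = true := by simpa using hpc
      cases ht : t.get? p.2 with
      | some s => simp [hb, ht]
      | none =>
        simp only [hb, ht, Option.bind_some, Option.map_none]
        rw [List.find?_eq_none]
        intro q hq
        have hkeys := acm_keys_filterMap_sublist t r
        have hq1 : q.1 ∈ r.map (fun x => x.1) := hkeys.mem (List.mem_map.mpr ⟨q, hq, rfl⟩)
        intro hbq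
        have : q.1 = c := by simpa using hbq
        exact hnd.1 (by rw [← hpc] at this; rw [← this]; exact hq1)
    · have hb : (p.1 == c) = false := by simpa using hpc
      cases ht : t.get? p.2 with
      | none => simp [hb, ih hnd.2]
      | some s => simp [hb, ih hnd.2]

lemma acmCompose_nodup (f t : PySem.Dict (Int × Int) (Int × Int)) :
    (acmCompose f t).keys.Nodup := by
  rw [acmCompose_eq]
  exact PySem.Dict.nodup_keys_foldl_insert_key
    (κ := Int × Int) (ν := Int × Int) (β := (Int × Int) × (Int × Int)) _
    (fun q => q.1) (fun _ q => q.2) _ PySem.Dict.nodup_keys_empty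

lemma acmCompose_get? (f t : PySem.Dict (Int × Int) (Int × Int)) (hnd : f.keys.Nodup) (c : Int × Int) :
    (acmCompose f t).get? c = (f.get? c).bind t.get? := by
  rw [acmCompose_eq, acm_get?_scatterD]
  have hndL : ((f.items.filterMap (fun p => (t.get? p.2).map (fun s => (p.1, s)))).map (·.1)).Nodup :=
    (acm_keys_filterMap_sublist t f.items).nodup hnd
  rw [acm_revfind_eq_find _ _ hndL, acm_find?_filterMap t c f.items hnd]
  rw [acm_get?_eq_find? f c]
  cases hf : f.items.find? (fun p => p.1 == c) with
  | none => simp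
  | some p =>
    cases ht : t.get? p.2 with
    | none => simp [ht]
    | some s => simp [ht]

lemma acmLift_spec : ∀ (fuel : Nat) (k : Int), k.toNat ≤ fuel →
    ∀ (total base : PySem.Dict (Int × Int) (Int × Int)), total.keys.Nodup → base.keys.Nodup →
      (acmLift total base k).keys.Nodup ∧
      ∀ c, (acmLift total base k).get? c = (total.get? c).bind (acmPow (fun c => base.get? c) k.toNat) := by
  intro fuel
  induction fuel with
  | zero =>
    intro k hk total base hndT hndB
    have hk0 : ¬ k > 0 := by omega
    rw [acmLift, if_neg hk0]
    have : k.toNat = 0 := by omega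
    rw [this]
    exact ⟨hndT, fun c => by cases htc : total.get? c <;> simp [acmPow]⟩
  | succ f ih =>
    intro k hk total base hndT hndB
    by_cases hk0 : k > 0
    · rw [acmLift, if_pos hk0]
      have hdiv : PySem.Int.floordiv k 2 = k / 2 := PySem.Int.floordiv_eq_ediv_of_pos (by omega)
      have hmod : PySem.Int.mod k 2 = k % 2 := PySem.Int.mod_eq_emod_of_pos (by omega)
      have hfuel : (PySem.Int.floordiv k 2).toNat ≤ f := by rw [hdiv]; omega
      have hndT' : (if PySem.Int.mod k 2 = 1 then acmCompose total base else total).keys.Nodup := by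
        split
        · exact acmCompose_nodup total base
        · exact hndT
      obtain ⟨hnd2, hget2⟩ := ih _ hfuel _ (acmCompose base base) hndT' (acmCompose_nodup base base)
      refine ⟨hnd2, fun c => ?_⟩
      rw [hget2 c]
      have hsq : ∀ n c', acmPow (fun c => (acmCompose base base).get? c) n c'
          = acmPow (fun c => base.get? c) (2 * n) c' := by
        intro n c'
        rw [acmPow_congr (fun c => acmCompose_get? base base hndB c) n c']
        exact acmPow_sq _ n c'
      have hsqf : acmPow (fun c => (acmCompose base base).get? c) (PySem.Int.floordiv k 2).toNat
          = acmPow (fun c => base.get? c) (2 * (PySem.Int.floordiv k 2).toNat) :=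
        funext (hsq _)
      rw [hsqf]
      -- arithmetic: k.toNat = 2 * (k/2).toNat + (k % 2).toNat, with k % 2 ∈ {0,1}
      by_cases hodd : PySem.Int.mod k 2 = 1
      · rw [if_pos hodd]
        rw [acmCompose_get? total base hndT c]
        have hkk : k.toNat = 2 * (PySem.Int.floordiv k 2).toNat + 1 := by
          rw [hdiv]; omega
        rw [hkk]
        cases htc : total.get? c with
        | none => simp
        | some s =>
          simp only [Option.bind_some]
          cases hbs : base.get? s with
          | none => simp [acmPow, hbs]
          | some u => simp [acmPow, hbs]
      · rw [if_neg hodd]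
        have hkk : k.toNat = 2 * (PySem.Int.floordiv k 2).toNat := by
          rw [hdiv]; rw [hmod] at hodd; omega
        rw [hkk]
    · rw [acmLift, if_neg hk0]
      have : k.toNat = 0 := by omega
      rw [this]
      exact ⟨hndT, fun c => by cases htc : total.get? c <;> simp [acmPow]⟩

lemma acm_stepD_get? (w h : Nat) (c : Int × Int) :
    ((acmP w h).foldl (fun d (s : Int × Int) => d.insert (acmG (w : Int) (h : Int) s) s)
      PySem.Dict.empty).get? c = acmPM w h c := by
  have hmap := acm_get?_scatterD ((acmP w h).map (fun s => (acmG (w : Int) (h : Int) s, s)))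
    PySem.Dict.empty c
  rw [List.foldl_map] at hmap
  rw [show ((acmP w h).foldl (fun d (s : Int × Int) => d.insert (acmG (w : Int) (h : Int) s) s)
      PySem.Dict.empty)
    = ((acmP w h).foldl (fun d (s : Int × Int) =>
        d.insert (acmG (w : Int) (h : Int) s, s).1 (acmG (w : Int) (h : Int) s, s).2)
      PySem.Dict.empty) from rfl, hmap]
  rw [← List.map_reverse, List.find?_map]
  rw [show ((fun (p : (Int × Int) × (Int × Int)) => p.1 == c) ∘ (fun s => (acmG (w : Int) (h : Int) s, s)))
    = (fun s => acmG (w : Int) (h : Int) s == c) from rfl]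
  rw [show ((acmP w h).reverse.find? (fun s => acmG (w : Int) (h : Int) s == c)) = acmPM w h c from rfl]
  cases hpm : acmPM w h c <;> simp

lemma acm_stepD_nodup (w h : Nat) :
    ((acmP w h).foldl (fun d (s : Int × Int) => d.insert (acmG (w : Int) (h : Int) s) s)
      PySem.Dict.empty).keys.Nodup :=
  PySem.Dict.nodup_keys_foldl_insert_key _ (acmG (w : Int) (h : Int)) (fun _ s => s) _
    PySem.Dict.nodup_keys_empty

lemma acm_totalD_get?_aux (w h : Nat) (c : Int × Int) :
    ((acmP w h).foldl (fun d (s : Int × Int) => d.insert s s) PySem.Dict.empty).get? c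
      = match (acmP w h).reverse.find? (fun s => s == c) with
        | some x => some x
        | none => none := by
  have hmap := acm_get?_scatterD ((acmP w h).map (fun s => (s, s))) PySem.Dict.empty c
  rw [List.foldl_map] at hmap
  rw [show ((acmP w h).foldl (fun d (s : Int × Int) => d.insert s s) PySem.Dict.empty)
    = ((acmP w h).foldl (fun d (s : Int × Int) => d.insert (s, s).1 (s, s).2) PySem.Dict.empty)
      from rfl, hmap]
  rw [← List.map_reverse, List.find?_map]
  rw [show ((fun (p : (Int × Int) × (Int × Int)) => p.1 == c) ∘ (fun (s : Int × Int) => (s, s)))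
    = (fun (s : Int × Int) => s == c) from rfl]
  cases hf : (acmP w h).reverse.find? (fun s => s == c) <;> simp

lemma acm_totalD_get?_of_in {w h : Nat} {c : Int × Int} (hin : acmIn w h c) :
    ((acmP w h).foldl (fun d (s : Int × Int) => d.insert s s) PySem.Dict.empty).get? c = some c := by
  rw [acm_totalD_get?_aux]
  have hmem : c ∈ (acmP w h).reverse := List.mem_reverse.mpr (acm_mem_acmP.mpr hin)
  cases hf : (acmP w h).reverse.find? (fun s => s == c) with
  | none =>
    rw [List.find?_eq_none] at hf
    exact absurd (by simp : (c == c) = true) (hf c hmem)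
  | some x =>
    have : x = c := by simpa using List.find?_some hf
    simp [this]

lemma acm_totalD_get?_of_not {w h : Nat} {c : Int × Int} (hin : ¬ acmIn w h c) :
    ((acmP w h).foldl (fun d (s : Int × Int) => d.insert s s) PySem.Dict.empty).get? c = none := by
  rw [acm_totalD_get?_aux]
  cases hf : (acmP w h).reverse.find? (fun s => s == c) with
  | none => simp
  | some x =>
    have hx : x = c := by simpa using List.find?_some hf
    have hmem : x ∈ acmP w h := List.mem_reverse.mp (List.mem_of_find?_eq_some hf)
    rw [hx] at hmem
    exact absurd (acm_mem_acmP.mp hmem) hin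

lemma acm_totalD_nodup (w h : Nat) :
    ((acmP w h).foldl (fun d (s : Int × Int) => d.insert s s) PySem.Dict.empty).keys.Nodup :=
  PySem.Dict.nodup_keys_foldl_insert_key _ (fun (s : Int × Int) => s) (fun _ s => s) _
    PySem.Dict.nodup_keys_empty

lemma acm_B_eq_build (m : List (List Int)) (it : Int) :
    arnold_cat_map_alt m it = acmBuild m.length (acmHN m)
      (fun c => ((acmPow (acmPM m.length (acmHN m)) (max it.toNat 1) c).map (acmE m)).getD 0) := by
  set w := m.length with hwdef
  set h := acmHN m with hhdef
  rw [arnold_cat_map_alt]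
  simp only [PySem.List.len_eq]
  rw [show (((PySem.List.pyGet? m 0).getD ([] : List Int)).length) = h from rfl,
    show m.length = w from rfl]
  simp only [Int.toNat_natCast]
  -- the two dict-building nested loops, flattened over the grid
  rw [show ((PySem.List.pyRange 0 (w : Int)).foldl (fun d x =>
        (PySem.List.pyRange 0 (h : Int)).foldl (fun d y =>
          d.insert (PySem.Int.mod (2 * x + y) (w : Int), PySem.Int.mod (x + y) (h : Int)) (x, y)) d)
        (PySem.Dict.empty : PySem.Dict (Int × Int) (Int × Int)))
      = ((acmP w h).foldl (fun d (s : Int × Int) => d.insert (acmG (w : Int) (h : Int) s) s)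
        PySem.Dict.empty)
    from acm_nested_fold_eq w h
      (fun (d : PySem.Dict (Int × Int) (Int × Int)) (s : Int × Int) =>
        d.insert (acmG (w : Int) (h : Int) s) s) PySem.Dict.empty]
  rw [show ((PySem.List.pyRange 0 (w : Int)).foldl (fun d i =>
        (PySem.List.pyRange 0 (h : Int)).foldl (fun d j => d.insert (i, j) (i, j)) d)
        (PySem.Dict.empty : PySem.Dict (Int × Int) (Int × Int)))
      = ((acmP w h).foldl (fun d (s : Int × Int) => d.insert s s) PySem.Dict.empty)
    from acm_nested_fold_eq w h
      (fun (d : PySem.Dict (Int × Int) (Int × Int)) (s : Int × Int) => d.insert s s)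
      PySem.Dict.empty]
  set kI : Int := if it > 1 then it else 1 with hkdef
  have hk1 : (0 : Int) < kI := by rw [hkdef]; split <;> omega
  have hkn : kI.toNat = max it.toNat 1 := by rw [hkdef]; split <;> omega
  set stepD := (acmP w h).foldl (fun d (s : Int × Int) =>
    d.insert (acmG (w : Int) (h : Int) s) s) PySem.Dict.empty with hsd
  set totD := (acmP w h).foldl (fun d (s : Int × Int) => d.insert s s) PySem.Dict.empty with htd
  obtain ⟨hndT, hgetT⟩ := acmLift_spec kI.toNat kI le_rfl totD stepD
    (acm_totalD_nodup w h) (acm_stepD_nodup w h)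
  set T := acmLift totD stepD kI with hT
  -- the gather loop is a scatter of T's items
  have hg : (T.items.map (fun p => (p.1, acmE m p.2))).foldl acmW
      (List.replicate w (List.replicate h (0 : Int)))
      = T.items.foldl (fun res p =>
          PySem.List.pySetD res p.1.1
            (PySem.List.pySetD ((PySem.List.pyGet? res p.1.1).getD []) p.1.2
              ((PySem.List.pyGet? ((PySem.List.pyGet? m p.2.1).getD []) p.2.2).getD 0)))
        (List.replicate w (List.replicate h (0 : Int))) := by
    rw [List.foldl_map]
    rfl
  rw [← hg]
  have hdest : ∀ q ∈ T.items.map (fun p => (p.1, acmE m p.2)), acmIn w h q.1 := by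
    intro q hq
    simp only [List.mem_map] at hq
    obtain ⟨p, hp, rfl⟩ := hq
    have hget : T.get? p.1 = some p.2 :=
      PySem.Dict.get?_of_mem_items T (show (p.1, p.2) ∈ T.items by simpa using hp) hndT
    rw [hgetT p.1] at hget
    by_cases hin : acmIn w h p.1
    · exact hin
    · rw [acm_totalD_get?_of_not hin] at hget
      simp at hget
  obtain ⟨hsh, hent⟩ := acm_scatter _ hdest _ (acmShape_zeros w h)
  apply acm_eq_build hsh
  intro c hc
  rw [hent c hc, ← List.map_reverse, List.find?_map]
  rw [show ((fun (q : (Int × Int) × Int) => q.1 == c) ∘ (fun (p : (Int × Int) × (Int × Int)) => (p.1, acmE m p.2)))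
    = (fun (p : (Int × Int) × (Int × Int)) => p.1 == c) from rfl]
  have hnd' : (T.items.map (fun (p : (Int × Int) × (Int × Int)) => p.1)).Nodup := by
    simpa only [PySem.Dict.keys] using hndT
  rw [acm_revfind_eq_find _ _ hnd']
  have hTc : T.get? c = acmPow (acmPM w h) (max it.toNat 1) c := by
    rw [hgetT c, acm_totalD_get?_of_in hc]
    simp only [Option.bind_some]
    rw [acmPow_congr (fun c' => acm_stepD_get? w h c') kI.toNat c, hkn]
  rw [acm_get?_eq_find? T c] at hTc
  cases hfd : T.items.find? (fun p => p.1 == c) with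
  | none =>
    rw [hfd] at hTc
    simp only [Option.map_none] at hTc
    rw [← hTc]
    simp [acmE_zeros hc]
  | some p =>
    rw [hfd] at hTc
    simp only [Option.map_some] at hTc
    rw [← hTc]
    simp

theorem arnold_cat_map_spec : Claim_equal_arnold_cat_map := by
  intro m it _ hpre
  obtain ⟨hm, _, _⟩ := hpre
  unfold Spec_arnold_cat_map
  have hw0 : 0 < m.length := List.length_pos_iff.mpr hm
  have hn : max it.toNat 1 = (max it.toNat 1 - 1) + 1 := by omega
  rw [acm_A_eq_iter, acm_B_eq_build m it, hn,
    acm_iter_build hw0 m rfl rfl (max it.toNat 1 - 1)]
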